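-- pv_equiv track=rewrite | github.com/GerritHillebrecht/Masterschool-advent-of-code | challenges/day_5.py | get_indices_of_correct_updates
-- ===== SOURCE A (Python) =====
-- def get_indices_of_correct_updates(updates, requirements):
--     return [
--         index
--         for index, update in enumerate(updates)
--         if all(
--             # Filter if the page_number or all pages that have to come after are not in the update.
--             (page_numer not in update or all(
--                 criteria_page_number not in update
--                 for criteria_page_number in criteria
--             )) or
--             # Otherwise check if the index of the page is smaller than of all the criteria pages
--             update.index(page_numer) < min(
--                 update.index(criteria_page_number)
--                 for criteria_page_number in criteria
--                 if criteria_page_number in update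
--             )
--             for page_numer, criteria in requirements.items()
--         )
--     ]
-- ===== SOURCE B (Python) =====
-- def get_indices_of_correct_updates(updates, requirements):
--     result = []
--     for index, update in enumerate(updates):
--         ok = True
--         seen = set()
--         for page in update:
--             if page in seen:
--                 continue
--             seen.add(page)
--             if any(c in seen for c in requirements.get(page, [])):
--                 ok = False
--                 break
--         if ok:
--             result.append(index)
--     return result
-- ===== Notes on version B (the rewrite author's own statement) =====
-- stated objective: faster
-- what changed: Instead of testing every requirement pair with repeated 'in'/.index/min list scans of the update, B makes one left-to-right pass per update with a running 'seen' set and flags a violation when a required-after page of the current page was already seen.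
import Mathlib
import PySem

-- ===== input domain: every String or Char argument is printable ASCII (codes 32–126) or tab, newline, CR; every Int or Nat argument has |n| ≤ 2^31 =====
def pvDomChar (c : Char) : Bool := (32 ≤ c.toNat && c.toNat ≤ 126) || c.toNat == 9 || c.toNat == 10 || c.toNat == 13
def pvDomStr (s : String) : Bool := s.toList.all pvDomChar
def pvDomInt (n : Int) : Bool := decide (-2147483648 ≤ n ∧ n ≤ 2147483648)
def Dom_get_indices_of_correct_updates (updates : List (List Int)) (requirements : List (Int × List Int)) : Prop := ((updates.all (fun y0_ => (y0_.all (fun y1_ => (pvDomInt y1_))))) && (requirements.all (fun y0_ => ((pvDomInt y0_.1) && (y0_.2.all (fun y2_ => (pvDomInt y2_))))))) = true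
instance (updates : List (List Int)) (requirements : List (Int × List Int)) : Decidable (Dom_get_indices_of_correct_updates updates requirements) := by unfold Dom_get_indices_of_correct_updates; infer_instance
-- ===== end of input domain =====

-- B replaces A's per-requirement pair of update.index/min scans by a single left-to-right pass
-- over each update with a running 'seen' set (objective: alternative single-pass decomposition).

-- ===== PORT A =====
-- per-requirement test of A's comprehension condition, transliterated
def condA (u : List Int) (pc : Int × List Int) : Bool :=
  ((!(decide (pc.1 ∈ u))) || pc.2.all (fun c => !(decide (c ∈ u)))) ||
  (match PySem.List.index? u pc.1,
         PySem.List.min? ((pc.2.filter (fun c => decide (c ∈ u))).map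
           (fun c => (PySem.List.index? u c).getD 0)) (fun x => x) with
   | some ip, some m => decide (ip < m)
   | _, _ => false)

def get_indices_of_correct_updates (updates : List (List Int)) (requirements : List (Int × List Int)) : List Int :=
  ((PySem.List.enumerate updates).filter
      (fun iu => requirements.all (fun pc => condA iu.2 pc))).map (fun iu => iu.1)

-- ===== PORT B =====
-- the inner loop of Source B: walk the update keeping the set of pages seen so far
def altScan (requirements : List (Int × List Int)) : List Int → PySem.Set Int → Bool
  | [], _ => true
  | p :: rest, seen =>
    if decide (p ∈ seen) then altScan requirements rest seen
    else
      let seen' := PySem.Set.add seen p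
      if ((PySem.Dict.mk requirements).getD p []).any (fun c => decide (c ∈ seen')) then false
      else altScan requirements rest seen'

def get_indices_of_correct_updates_alt (updates : List (List Int)) (requirements : List (Int × List Int)) : List Int :=
  (PySem.List.enumerate updates).foldl
    (fun acc iu => if altScan requirements iu.2 PySem.Set.empty then acc ++ [iu.1] else acc) []

-- ===== PRECONDITION & SPEC =====
-- Pre_ excludes association lists with duplicate keys: 'requirements' is a Python dict, which
-- cannot contain a duplicate key, so no Python input corresponds to such a list.
def Pre_get_indices_of_correct_updates (updates : List (List Int)) (requirements : List (Int × List Int)) : Prop :=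
  (requirements.map Prod.fst).Nodup

instance (updates : List (List Int)) (requirements : List (Int × List Int)) : Decidable (Pre_get_indices_of_correct_updates updates requirements) := by unfold Pre_get_indices_of_correct_updates; infer_instance

def pvWitness_get_indices_of_correct_updates : List (List Int) × (List (Int × List Int)) :=
  ([[1, 2, 3], [3, 2, 1], [2]], [(1, [2, 3]), (2, [3])])

def Spec_get_indices_of_correct_updates (updates : List (List Int)) (requirements : List (Int × List Int)) (out : List Int) : Prop := out = get_indices_of_correct_updates_alt updates requirements
instance (updates : List (List Int)) (requirements : List (Int × List Int)) (out : List Int) : Decidable (Spec_get_indices_of_correct_updates updates requirements out) := by unfold Spec_get_indices_of_correct_updates; infer_instance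

-- ===== CLAIM (what is proved, stated in full; the proofs are below) =====
def Claim_equal_get_indices_of_correct_updates : Prop := ∀ (updates : List (List Int)) (requirements : List (Int × List Int)), Dom_get_indices_of_correct_updates updates requirements → Pre_get_indices_of_correct_updates updates requirements → Spec_get_indices_of_correct_updates updates requirements (get_indices_of_correct_updates updates requirements)

-- ===== LEMMAS AND PROOFS =====

-- the declarative middle ground both per-update checkers are proved equivalent to:
-- every requirement key occurring in u comes strictly before every present page of its criteria
def Ordered (u : List Int) (pc : Int × List Int) : Prop :=
  ∀ c ∈ pc.2, ∀ ip ic, PySem.List.index? u pc.1 = some ip →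
    PySem.List.index? u c = some ic → ip < ic

-- index? on an append when the element is not in the prefix
theorem index?_append_of_not_mem {x : Int} (l t : List Int) (h : x ∉ l) :
    PySem.List.index? (l ++ t) x = (PySem.List.index? t x).map (· + l.length) := by
  induction l with
  | nil => simp [Option.map_id']
  | cons a l ih =>
    have ha : a ≠ x := by intro e; exact h (e ▸ List.mem_cons_self)
    rw [List.cons_append, PySem.List.index?_cons_of_ne _ ha, ih (fun hx => h (List.mem_cons_of_mem _ hx))]
    cases PySem.List.index? t x
    · simp
    · simp; omega

-- first-match lookup in a duplicate-free association list finds any listed pair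
theorem get?_mk_of_nodup (req : List (Int × List Int)) (p : Int) (crit : List Int)
    (hnd : (req.map Prod.fst).Nodup) (hmem : (p, crit) ∈ req) :
    (PySem.Dict.mk req).get? p = some crit := by
  induction req with
  | nil => cases hmem
  | cons a rest ih =>
    rw [show PySem.Dict.mk (a :: rest) = { items := (a.1, a.2) :: rest } by rfl]
    rw [PySem.Dict.get?_mk_cons]
    rcases List.mem_cons.mp hmem with h | h
    · simp [← h]
    · have hne : a.1 ≠ p := by
        intro e
        have : p ∈ rest.map Prod.fst := List.mem_map.mpr ⟨(p, crit), h, rfl⟩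
        rw [List.map_cons, List.nodup_cons, e] at hnd
        exact hnd.1 this
      simp [hne]
      exact ih (List.nodup_cons.mp hnd).2 h

-- a successful first-match lookup names a pair of the list
theorem get?_mk_mem (req : List (Int × List Int)) (p : Int) (crit : List Int)
    (h : (PySem.Dict.mk req).get? p = some crit) : (p, crit) ∈ req := by
  induction req with
  | nil => simp [PySem.Dict.get?] at h
  | cons a rest ih =>
    rw [show PySem.Dict.mk (a :: rest) = { items := (a.1, a.2) :: rest } by rfl,
      PySem.Dict.get?_mk_cons] at h
    by_cases e : a.1 = p
    · simp [e] at h; exact List.mem_cons.mpr (Or.inl (by rw [← e, ← h]))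
    · simp [e] at h; exact List.mem_cons.mpr (Or.inr (ih h))

-- A's per-requirement condition says exactly 'Ordered'
theorem condA_iff (u : List Int) (pc : Int × List Int) :
    condA u pc = true ↔ Ordered u pc := by
  obtain ⟨p, crit⟩ := pc
  by_cases hp : p ∈ u
  · obtain ⟨ip, hip⟩ := Option.isSome_iff_exists.mp ((PySem.List.index?_isSome_iff u p).mpr hp)
    by_cases hc : ∀ c ∈ crit, c ∉ u
    · constructor
      · intro _ c hcmem ip' ic h1 h2
        have hn := (PySem.List.index?_eq_none_iff u c).mpr (hc c hcmem)
        rw [h2] at hn; cases hn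
      · intro _
        simp only [condA, Bool.or_eq_true, Bool.not_eq_eq_eq_not, List.all_eq_true]
        exact Or.inl (Or.inr (fun c hcm => by simpa using hc c hcm))
    · push_neg at hc
      obtain ⟨c0, hc0m, hc0u⟩ := hc
      set L := (crit.filter (fun c => decide (c ∈ u))).map
           (fun c => ((PySem.List.index? u c).getD 0 : Nat)) with hL
      have hLne : L ≠ [] := by
        simp only [hL, ne_eq, List.map_eq_nil_iff, List.filter_eq_nil_iff]
        intro h; exact (by simpa using h c0 hc0m : c0 ∉ u) hc0u
      obtain ⟨m, hm⟩ := Option.ne_none_iff_exists'.mp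
        (show PySem.List.min? L (fun x => x) ≠ none from
          fun e => hLne ((PySem.List.min?_eq_none_iff L (fun x => x)).mp e))
      have hcond : condA u (p, crit) = true ↔ ip < m := by
        simp only [condA]
        rw [← hL, hip, hm]
        show ((!(decide (p ∈ u))) || crit.all (fun c => !(decide (c ∈ u))) || decide (ip < m)) = true ↔ ip < m
        simp only [Bool.or_eq_true, Bool.not_eq_true', decide_eq_false_iff_not,
          decide_eq_true_eq, List.all_eq_true]
        constructor
        · rintro ((h | h) | h)
          · exact absurd hp h
          · exact absurd hc0u (by simpa using h c0 hc0m)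
          · exact h
        · exact fun h => Or.inr h
      rw [hcond]
      constructor
      · intro h c hcm ip' ic h1 h2
        have h1' : PySem.List.index? u p = some ip' := h1
        rw [hip] at h1'
        obtain rfl : ip = ip' := Option.some_inj.mp h1'
        have hcu : c ∈ u := (PySem.List.index?_isSome_iff u c).mp
          (Option.isSome_iff_exists.mpr ⟨ic, h2⟩)
        have hmemL : ic ∈ L := by
          rw [hL]
          exact List.mem_map.mpr ⟨c, List.mem_filter.mpr ⟨hcm, by simpa⟩, by rw [h2]; rfl⟩
        exact lt_of_lt_of_le h (PySem.List.min?_isMin hm _ hmemL)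
      · intro hord
        obtain ⟨c1, hc1f, hc1⟩ := List.mem_map.mp (hL ▸ PySem.List.min?_mem hm)
        obtain ⟨hc1m, hc1u⟩ := List.mem_filter.mp hc1f
        obtain ⟨ic1, hic1⟩ := Option.isSome_iff_exists.mp
          ((PySem.List.index?_isSome_iff u c1).mpr (of_decide_eq_true hc1u))
        have hmic : m = ic1 := by rw [← hc1, hic1]; rfl
        rw [hmic]
        exact hord c1 hc1m ip ic1 hip hic1
  · have hnone : PySem.List.index? u p = none := (PySem.List.index?_eq_none_iff u p).mpr hp
    constructor
    · intro _ c hcm ip ic h1 _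
      have h1' : PySem.List.index? u p = some ip := h1
      rw [hnone] at h1'; cases h1'
    · intro _
      simp only [condA, Bool.or_eq_true, Bool.not_eq_eq_eq_not, Bool.not_true]
      exact Or.inl (Or.inl (by simpa using hp))

-- B's scan characterised by the splits of the update it walks
theorem altScan_iff (req : List (Int × List Int)) (u : List Int) (seen : PySem.Set Int) :
    altScan req u seen = true ↔
      ∀ x p y, u = x ++ p :: y → p ∉ seen → p ∉ x →
        ∀ c ∈ (PySem.Dict.mk req).getD p [], ¬(c ∈ seen ∨ c ∈ x ∨ c = p) := by
  induction u generalizing seen with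
  | nil =>
    simp only [altScan, true_iff]
    intro x p y hxy
    cases x <;> simp at hxy
  | cons q rest ih =>
    by_cases hq : q ∈ seen
    · rw [altScan]
      simp only [hq, decide_true, if_true]
      rw [ih seen]
      constructor
      · intro h x p y hxy hpseen hpx c hc
        cases x with
        | nil =>
          rw [List.nil_append] at hxy
          injection hxy with h1 h2
          subst h1
          exact absurd hq hpseen
        | cons q' x' =>
          rw [List.cons_append] at hxy
          injection hxy with h1 h2
          subst h1
          intro hbad
          have hpx' : p ∉ x' := fun h' => hpx (List.mem_cons_of_mem _ h')
          refine h x' p y h2 hpseen hpx' c hc ?_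
          rcases hbad with h' | h' | h'
          · exact Or.inl h'
          · rcases List.mem_cons.mp h' with rfl | h'
            · exact Or.inl hq
            · exact Or.inr (Or.inl h')
          · exact Or.inr (Or.inr h')
      · intro h x p y hxy hpseen hpx c hc hbad
        refine h (q :: x) p y (by rw [hxy]; rfl) hpseen ?_ c hc ?_
        · intro h'
          rcases List.mem_cons.mp h' with rfl | h'
          · exact hpseen hq
          · exact hpx h'
        · rcases hbad with h' | h' | h'
          · exact Or.inl h'
          · exact Or.inr (Or.inl (List.mem_cons_of_mem _ h'))
          · exact Or.inr (Or.inr h')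
    · rw [altScan]
      simp only [hq, decide_false, Bool.false_eq_true, if_false, Bool.if_false_left,
        Bool.and_eq_true, Bool.not_eq_true', decide_eq_false_iff_not]
      rw [ih (PySem.Set.add seen q)]
      constructor
      · rintro ⟨hhead, htail⟩ x p y hxy hpseen hpx c hc
        cases x with
        | nil =>
          rw [List.nil_append] at hxy
          injection hxy with h1 h2
          intro hbad
          apply hhead
          refine List.any_eq_true.mpr ⟨c, ?_, ?_⟩
          · rw [h1]; exact hc
          · simp only [decide_eq_true_eq]
            rcases hbad with h' | h' | h'
            · exact (PySem.Set.mem_add seen q c).mpr (Or.inl h')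
            · cases h'
            · exact (PySem.Set.mem_add seen q c).mpr (Or.inr (h'.trans h1.symm))
        | cons q' x' =>
          rw [List.cons_append] at hxy
          injection hxy with h1 h2
          intro hbad
          have hpx' : p ∉ x' := fun h' => hpx (List.mem_cons_of_mem _ h')
          have hpq : p ≠ q := fun e => hpx (by rw [e, h1]; exact List.mem_cons_self)
          have hpseen' : p ∉ PySem.Set.add seen q := by
            intro h'
            rcases (PySem.Set.mem_add seen q p).mp h' with h' | h'
            · exact hpseen h'
            · exact hpq h'
          refine htail x' p y h2 hpseen' hpx' c hc ?_
          rcases hbad with h' | h' | h'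
          · exact Or.inl ((PySem.Set.mem_add seen q c).mpr (Or.inl h'))
          · rcases List.mem_cons.mp h' with h'' | h''
            · exact Or.inl ((PySem.Set.mem_add seen q c).mpr (Or.inr (h''.trans h1.symm)))
            · exact Or.inr (Or.inl h'')
          · exact Or.inr (Or.inr h')
      · intro h
        constructor
        · intro hany
          obtain ⟨c, hc, hcadd⟩ := List.any_eq_true.mp hany
          have hcadd' : c ∈ PySem.Set.add seen q := by simpa using hcadd
          refine h [] q rest rfl hq (by simp) c hc ?_
          rcases (PySem.Set.mem_add seen q c).mp hcadd' with h' | h'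
          · exact Or.inl h'
          · exact Or.inr (Or.inr h')
        · intro x p y hxy hpseen hpx c hc hbad
          have hpq : p ≠ q := fun e =>
            hpseen ((PySem.Set.mem_add seen q p).mpr (Or.inr e))
          refine h (q :: x) p y (by rw [hxy]; rfl) ?_ ?_ c hc ?_
          · exact fun h' => hpseen ((PySem.Set.mem_add seen q p).mpr (Or.inl h'))
          · intro h'
            rcases List.mem_cons.mp h' with h' | h'
            · exact hpq h'
            · exact hpx h'
          · rcases hbad with h' | h' | h'
            · rcases (PySem.Set.mem_add seen q c).mp h' with h' | h'
              · exact Or.inl h'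
              · exact Or.inr (Or.inl (h' ▸ List.mem_cons_self))
            · exact Or.inr (Or.inl (List.mem_cons_of_mem _ h'))
            · exact Or.inr (Or.inr h')

-- on a duplicate-key-free requirements list the two per-update checkers agree
theorem checkers_agree (req : List (Int × List Int)) (u : List Int)
    (hnd : (req.map Prod.fst).Nodup) :
    req.all (fun pc => condA u pc) = altScan req u PySem.Set.empty := by
  rw [Bool.eq_iff_iff, List.all_eq_true, altScan_iff]
  constructor
  · intro H x p y hxy _ hpx c hc hbad
    obtain ⟨crit, hget⟩ : ∃ crit, (PySem.Dict.mk req).get? p = some crit := by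
      cases e : (PySem.Dict.mk req).get? p with
      | none =>
        exfalso
        have : (PySem.Dict.mk req).getD p [] = [] := by
          show ((PySem.Dict.mk req).get? p).getD [] = []
          rw [e]; rfl
        rw [this] at hc; cases hc
      | some crit => exact ⟨crit, rfl⟩
    have hcc : c ∈ crit := by
      have : (PySem.Dict.mk req).getD p [] = crit := by
        show ((PySem.Dict.mk req).get? p).getD [] = crit
        rw [hget]; rfl
      rwa [this] at hc
    have hmem := get?_mk_mem req p crit hget
    have hord := condA_iff u (p, crit) |>.mp (H _ hmem)
    have hip : PySem.List.index? u p = some x.length :=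
      (PySem.List.index?_eq_some_iff u p x.length).mpr ⟨x, y, hxy, rfl, hpx⟩
    rcases hbad with h' | h' | h'
    · cases h'
    · obtain ⟨ic, hic⟩ := Option.isSome_iff_exists.mp ((PySem.List.index?_isSome_iff x c).mpr h')
      obtain ⟨pre, suf, hxps, hlen, -⟩ := (PySem.List.index?_eq_some_iff x c ic).mp hic
      have hlt : ic < x.length := by
        rw [hxps, List.length_append, List.length_cons]; omega
      have hicu : PySem.List.index? u c = some ic := by
        rw [hxy, PySem.List.index?_append_of_mem _ h', hic]
      exact absurd (hord c hcc x.length ic hip hicu) (by omega)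
    · subst h'
      exact absurd (hord c hcc x.length x.length hip hip) (by omega)
  · intro H pc hpc
    rw [condA_iff]
    obtain ⟨p, crit⟩ := pc
    intro c hcc ip ic hip hic
    have hip' : PySem.List.index? u p = some ip := hip
    obtain ⟨x, y, hxy, hlen, hpx⟩ := (PySem.List.index?_eq_some_iff u p ip).mp hip'
    have hget : (PySem.Dict.mk req).get? p = some crit := get?_mk_of_nodup req p crit hnd hpc
    have hgetD : (PySem.Dict.mk req).getD p [] = crit := by
      show ((PySem.Dict.mk req).get? p).getD [] = crit
      rw [hget]; rfl
    have hng := H x p y hxy (by simp [PySem.Set.empty]) hpx c (hgetD ▸ hcc)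
    have hcx : c ∉ x := fun h' => hng (Or.inr (Or.inl h'))
    have hcp : c ≠ p := fun h' => hng (Or.inr (Or.inr h'))
    have hrw : PySem.List.index? u c = ((PySem.List.index? y c).map (· + 1)).map (· + x.length) := by
      rw [hxy, index?_append_of_not_mem x (p :: y) hcx,
        PySem.List.index?_cons_of_ne y (Ne.symm hcp)]
    rw [hrw] at hic
    cases e : PySem.List.index? y c with
    | none => rw [e] at hic; cases hic
    | some j =>
      rw [e] at hic
      simp only [Option.map_some] at hic
      have : ic = j + 1 + x.length := (Option.some_inj.mp hic).symm
      omega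

-- ===== VERDICT (by name: the statement is the Claim_ definition above) =====
theorem get_indices_of_correct_updates_spec : Claim_equal_get_indices_of_correct_updates := by
  intro updates requirements _ hpre
  unfold Spec_get_indices_of_correct_updates
  unfold get_indices_of_correct_updates get_indices_of_correct_updates_alt
  rw [PySem.List.foldl_append_if (fun iu => altScan requirements iu.2 PySem.Set.empty)
    (fun (iu : Int × List Int) => iu.1) (PySem.List.enumerate updates) []]
  simp only [List.nil_append]
  congr 1
  apply List.filter_congr
  intro iu _
  exact checkers_agree requirements iu.2 hpre
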